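-- pv_equiv track=rewrite | github.com/boppreh/cryptopals-challenge | set1/1.py | encode_base
-- ===== SOURCE A (Python) =====
-- import math
--
-- def get_chars_per_byte(base_chars):
--     """
--     Calculates how many characters are required to represent a byte
--     in the base with the given symbol list.
--     """
--     chars_per_byte = math.log(2**8, len(base_chars))
--     assert chars_per_byte == int(chars_per_byte), chars_per_byte
--     return  int(chars_per_byte)
--
-- def encode_base(bytes, base_chars):
--     """
--     Encodes the given bytes in a string using the symbols from `base_chars`.
--
--         encode_base([0xFF], '01')
--     """
--     chars_per_byte = get_chars_per_byte(base_chars)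
--
--     chars = []
--     for b in bytes:
--         for i in reversed(range(chars_per_byte)):
--             power = len(base_chars)**i
--             chars.append(base_chars[int(b / power)])
--             b %= power
--     return ''.join(chars)
-- ===== SOURCE B (Python) =====
-- import math
--
-- def get_chars_per_byte(base_chars):
--     """
--     Calculates how many characters are required to represent a byte
--     in the base with the given symbol list.
--     """
--     chars_per_byte = math.log(2**8, len(base_chars))
--     assert chars_per_byte == int(chars_per_byte), chars_per_byte
--     return int(chars_per_byte)
--
-- def encode_base(bytes, base_chars):
--     """
--     Encodes the given bytes in a string using the symbols from `base_chars`,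
--     by exact repeated divmod per byte (least-significant digit first, then
--     reversed), instead of high-to-low power extraction.
--     """
--     chars_per_byte = get_chars_per_byte(base_chars)
--     n = len(base_chars)
--     chunks = []
--     for b in bytes:
--         digits = []
--         for _ in range(chars_per_byte):
--             b, d = divmod(b, n)
--             digits.append(base_chars[d])
--         chunks.append(''.join(reversed(digits)))
--     return ''.join(chunks)
-- ===== Notes on version B (the rewrite author's own statement) =====
-- stated objective: alternative
-- what changed: Per byte, B extracts digits by repeated exact integer divmod (least-significant first, reversed per chunk, chunks joined) instead of A's high-to-low power extraction with float division int(b/power) and b %= power; Pre_ restricts to the natural domain of the function: base lengths {2,4,16,256} (elsewhere the helper raises) and byte values 0-255 (A raises IndexError above 255, and negative arguments are not bytes).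
-- outside the precondition, e.g. on encode_base([-1], '01'): A returns '01111111', B returns '11111111'; on encode_base([-2], '0123456789abcdef'): A returns '0e', B returns 'fe'
import Mathlib
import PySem

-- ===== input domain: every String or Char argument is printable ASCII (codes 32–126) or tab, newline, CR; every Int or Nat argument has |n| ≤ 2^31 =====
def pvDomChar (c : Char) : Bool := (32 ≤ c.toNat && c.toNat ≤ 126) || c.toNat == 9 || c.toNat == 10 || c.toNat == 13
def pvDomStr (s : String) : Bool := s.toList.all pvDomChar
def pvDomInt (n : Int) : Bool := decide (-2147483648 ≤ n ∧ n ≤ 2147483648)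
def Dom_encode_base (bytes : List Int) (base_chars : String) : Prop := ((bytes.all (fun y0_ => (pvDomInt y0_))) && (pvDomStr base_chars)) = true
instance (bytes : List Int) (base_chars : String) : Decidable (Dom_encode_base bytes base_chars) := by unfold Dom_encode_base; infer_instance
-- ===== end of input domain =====

-- B replaces A's per-byte high-to-low power extraction (base**i, int(b/power), b %= power)
-- with exact repeated divmod accumulation (least-significant digit first, chunk reversed);
-- same value on Pre_ (base length in {2,4,16,256}, byte values 0–255).

-- ===== PORT A =====
-- math.log(2**8, len(base_chars)) is an exact integer precisely for lengths 2, 4, 16, 256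
-- (checked in CPython for every length a printable string can have); for every other length
-- the assert (or math.log itself, for length 0/1) raises, modelled as `none`. Exact there.
def get_chars_per_byte (base_chars : String) : Option Int :=
  let L := PySem.Str.len base_chars
  if L = 2 then some 8
  else if L = 4 then some 4
  else if L = 16 then some 2
  else if L = 256 then some 1
  else none

-- int(b / power): float division then truncation toward zero = PySem.Int.truncdiv
-- (exact here: |b| ≤ 2^31 and power a power of two, both below 2^53).
-- base_chars[...] = PySem.Str.pyGet? (none = IndexError, unreachable under Pre_; defaulted to ' ').
def encode_base (bytes : List Int) (base_chars : String) : String :=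
  match get_chars_per_byte base_chars with
  | none => ""    -- get_chars_per_byte raised: outside Pre_
  | some chars_per_byte =>
    let chars : List Char := bytes.foldl (fun acc b =>
      (((PySem.List.pyRange 0 chars_per_byte 1).reverse).foldl
        (fun (st : List Char × Int) i =>
          let power : Int := (PySem.Str.len base_chars) ^ i.toNat
          (st.1 ++ [(PySem.Str.pyGet? base_chars (PySem.Int.truncdiv st.2 power)).getD ' '],
           PySem.Int.mod st.2 power))
        (acc, b)).1) []
    String.ofList chars

-- ===== PORT B =====
def encode_base_alt (bytes : List Int) (base_chars : String) : String :=
  match get_chars_per_byte base_chars with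
  | none => ""    -- get_chars_per_byte raised: outside Pre_
  | some chars_per_byte =>
    let n : Int := PySem.Str.len base_chars
    let chunks : List String := bytes.foldl (fun acc b =>
      let st := (PySem.List.pyRange 0 chars_per_byte 1).foldl
        (fun (st : Int × List Char) _ =>
          let bd := (PySem.Int.divmod? st.1 n).getD (0, 0)   -- n ≠ 0 under Pre_
          (bd.1, st.2 ++ [(PySem.Str.pyGet? base_chars bd.2).getD ' ']))
        (b, [])
      acc ++ [String.ofList st.2.reverse]) []
    PySem.Str.join "" chunks

-- ===== PRECONDITION & SPEC =====
-- Pre_ is the natural domain of the function: a base whose length the helper accepts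
-- (any other length raises in get_chars_per_byte) and byte values 0–255
-- (A raises IndexError for b ≥ 256; negative arguments are not bytes).
def Pre_encode_base (bytes : List Int) (base_chars : String) : Prop :=
  (PySem.Str.len base_chars = 2 ∨ PySem.Str.len base_chars = 4 ∨
   PySem.Str.len base_chars = 16 ∨ PySem.Str.len base_chars = 256)
  ∧ ∀ b ∈ bytes, 0 ≤ b ∧ b < 256

instance (bytes : List Int) (base_chars : String) : Decidable (Pre_encode_base bytes base_chars) := by
  unfold Pre_encode_base; infer_instance

def pvWitness_encode_base : List Int × String := ([255, 0, 3], "01")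

def Spec_encode_base (bytes : List Int) (base_chars : String) (out : String) : Prop := out = encode_base_alt bytes base_chars
instance (bytes : List Int) (base_chars : String) (out : String) : Decidable (Spec_encode_base bytes base_chars out) := by unfold Spec_encode_base; infer_instance

-- ===== CLAIM (what is proved, stated in full; the proofs are below) =====
def Claim_equal_encode_base : Prop := ∀ (bytes : List Int) (base_chars : String), Dom_encode_base bytes base_chars → Pre_encode_base bytes base_chars → Spec_encode_base bytes base_chars (encode_base bytes base_chars)

-- ===== LEMMAS AND PROOFS =====

-- digit list of A's inner loop (most-significant first, indices from the reversed range)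
def pvAdig (L : Int) : List Int → Int → List Int
  | [], _ => []
  | i :: is, b => PySem.Int.truncdiv b (L ^ i.toNat) :: pvAdig L is (PySem.Int.mod b (L ^ i.toNat))

-- digit list of B's inner loop (least-significant first, one divmod per step)
def pvBdig (L : Int) : Nat → Int → List Int
  | 0, _ => []
  | c + 1, b => PySem.Int.mod b L :: pvBdig L c (PySem.Int.floordiv b L)

set_option maxHeartbeats 2000000 in
set_option maxRecDepth 10000 in
theorem pv_dig_eq : ∀ p ∈ [((2:Int),(8:Nat)), (4,4), (16,2), (256,1)], ∀ k ∈ List.range 256,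
    pvAdig p.1 ((PySem.List.pyRange 0 (p.2:Int) 1).reverse) (k:Int) = (pvBdig p.1 p.2 (k:Int)).reverse := by
  decide

theorem pv_afold (f : Int → Char) (L : Int) :
    ∀ (is : List Int) (acc : List Char) (b : Int),
      (is.foldl (fun (st : List Char × Int) i =>
          (st.1 ++ [f (PySem.Int.truncdiv st.2 (L ^ i.toNat))],
           PySem.Int.mod st.2 (L ^ i.toNat))) (acc, b)).1
      = acc ++ (pvAdig L is b).map f := by
  intro is
  induction is with
  | nil => intro acc b; simp [pvAdig]
  | cons i is ih =>
    intro acc b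
    simp only [List.foldl_cons, pvAdig, List.map_cons]
    rw [ih]
    simp

theorem pv_bfold (f : Int → Char) (L : Int) (hL0 : L ≠ 0) :
    ∀ (is : List Int) (acc : List Char) (b : Int),
      (is.foldl (fun (st : Int × List Char) _ =>
          (((PySem.Int.divmod? st.1 L).getD (0,0)).1,
           st.2 ++ [f (((PySem.Int.divmod? st.1 L).getD (0,0)).2)])) (b, acc)).2
      = acc ++ (pvBdig L is.length b).map f := by
  intro is
  induction is with
  | nil => intro acc b; simp [pvBdig]
  | cons i is ih =>
    intro acc b
    simp only [List.foldl_cons, List.length_cons]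
    rw [ih]
    simp [PySem.Int.divmod?, PySem.Int.floordiv, PySem.Int.mod, hL0, pvBdig]

theorem pv_outerA (f : Int → Char) (L : Int) (R : List Int) :
    ∀ (bytes : List Int) (acc : List Char),
      (bytes.foldl (fun acc b =>
        ((R.foldl (fun (st : List Char × Int) i =>
          (st.1 ++ [f (PySem.Int.truncdiv st.2 (L ^ i.toNat))],
           PySem.Int.mod st.2 (L ^ i.toNat))) (acc, b)).1)) acc)
      = acc ++ (bytes.map (fun b => (pvAdig L R b).map f)).flatten := by
  intro bytes
  induction bytes with
  | nil => intro acc; simp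
  | cons b bs ih =>
    intro acc
    simp only [List.foldl_cons, List.map_cons, List.flatten_cons]
    rw [pv_afold f L R acc b, ih]
    simp

theorem pv_outerB (f : Int → Char) (L : Int) (hL0 : L ≠ 0) (R : List Int) :
    ∀ (bytes : List Int) (acc : List String),
      (bytes.foldl (fun acc b =>
        acc ++ [String.ofList ((R.foldl (fun (st : Int × List Char) _ =>
          (((PySem.Int.divmod? st.1 L).getD (0,0)).1,
           st.2 ++ [f (((PySem.Int.divmod? st.1 L).getD (0,0)).2)])) (b, ([] : List Char))).2.reverse)]) acc)
      = acc ++ bytes.map (fun b => String.ofList (((pvBdig L R.length b).map f).reverse)) := by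
  intro bytes
  induction bytes with
  | nil => intro acc; simp
  | cons b bs ih =>
    intro acc
    simp only [List.foldl_cons, List.map_cons]
    rw [ih, pv_bfold f L hL0 R [] b]
    simp

theorem pv_chars_join_nil : ∀ (css : List (List Char)), PySem.Chars.join [] css = css.flatten := by
  intro css
  induction css with
  | nil => simp [PySem.Chars.join_nil]
  | cons c cs ih =>
    cases cs with
    | nil => simp [PySem.Chars.join_singleton]
    | cons d ds => simp_all [PySem.Chars.join_cons_cons]

-- ''.join of chunks built from char lists is the flattened char list
theorem pv_join_nil : ∀ (css : List (List Char)),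
    PySem.Str.join "" (css.map String.ofList) = String.ofList css.flatten := by
  intro css
  simp [PySem.Str.join, Function.comp_def, pv_chars_join_nil]

theorem pv_case (base_chars : String) (cpb L : Int) (c : Nat)
    (hmem : (L, c) ∈ [((2:Int),(8:Nat)), (4,4), (16,2), (256,1)])
    (hlen : PySem.Str.len base_chars = L) (hcpb : cpb = (c : Int))
    (bytes : List Int) (hB : ∀ b ∈ bytes, 0 ≤ b ∧ b < 256) :
    String.ofList (bytes.foldl (fun acc b =>
      (((PySem.List.pyRange 0 cpb 1).reverse).foldl
        (fun (st : List Char × Int) i =>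
          (st.1 ++ [(PySem.Str.pyGet? base_chars (PySem.Int.truncdiv st.2 ((PySem.Str.len base_chars) ^ i.toNat))).getD ' '],
           PySem.Int.mod st.2 ((PySem.Str.len base_chars) ^ i.toNat)))
        (acc, b)).1) [])
    = PySem.Str.join "" (bytes.foldl (fun acc b =>
        acc ++ [String.ofList (((PySem.List.pyRange 0 cpb 1).foldl
          (fun (st : Int × List Char) _ =>
            (((PySem.Int.divmod? st.1 (PySem.Str.len base_chars)).getD (0,0)).1,
             st.2 ++ [(PySem.Str.pyGet? base_chars (((PySem.Int.divmod? st.1 (PySem.Str.len base_chars)).getD (0,0)).2)).getD ' ']))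
          (b, ([] : List Char))).2.reverse)]) [])
    := by
  have hL0 : L ≠ 0 := by fin_cases hmem <;> decide
  have hRlen : (PySem.List.pyRange 0 cpb 1).length = c := by
    rw [hcpb]; simp [PySem.List.length_pyRange_one]
  rw [hlen,
      pv_outerA (fun d => (PySem.Str.pyGet? base_chars d).getD ' ') L ((PySem.List.pyRange 0 cpb 1).reverse) bytes [],
      pv_outerB (fun d => (PySem.Str.pyGet? base_chars d).getD ' ') L hL0 (PySem.List.pyRange 0 cpb 1) bytes []]
  simp only [List.nil_append, hRlen]
  have hmapeq : bytes.map (fun b => String.ofList (((pvBdig L c b).map (fun d => (PySem.Str.pyGet? base_chars d).getD ' ')).reverse))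
      = (bytes.map (fun b => (pvAdig L ((PySem.List.pyRange 0 cpb 1).reverse) b).map (fun d => (PySem.Str.pyGet? base_chars d).getD ' '))).map String.ofList := by
    rw [List.map_map]
    apply List.map_congr_left
    intro b hb
    obtain ⟨hb0, hb256⟩ := hB b hb
    have hk : b = ((b.toNat : Nat) : Int) := (Int.toNat_of_nonneg hb0).symm
    have hkm : b.toNat ∈ List.range 256 := List.mem_range.mpr (by omega)
    have := pv_dig_eq (L, c) hmem b.toNat hkm
    simp only at this
    rw [← List.map_reverse]
    rw [hcpb, hk, ← this]
    simp
  rw [hmapeq, pv_join_nil]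

-- ===== VERDICT (by name: the statement is the Claim_ definition above) =====
theorem encode_base_spec : Claim_equal_encode_base := by
  intro bytes base_chars _hDom hPre
  unfold Spec_encode_base
  obtain ⟨hL, hB⟩ := hPre
  rcases hL with h | h | h | h
  · have h' : (base_chars.length : Int) = 2 := by simpa using h
    have hg : get_chars_per_byte base_chars = some 8 := by simp [get_chars_per_byte, h']
    simp only [encode_base, encode_base_alt, hg]
    exact pv_case base_chars 8 2 8 (by decide) h (by norm_num) bytes hB
  · have h' : (base_chars.length : Int) = 4 := by simpa using h
    have hg : get_chars_per_byte base_chars = some 4 := by simp [get_chars_per_byte, h']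
    simp only [encode_base, encode_base_alt, hg]
    exact pv_case base_chars 4 4 4 (by decide) h (by norm_num) bytes hB
  · have h' : (base_chars.length : Int) = 16 := by simpa using h
    have hg : get_chars_per_byte base_chars = some 2 := by simp [get_chars_per_byte, h']
    simp only [encode_base, encode_base_alt, hg]
    exact pv_case base_chars 2 16 2 (by decide) h (by norm_num) bytes hB
  · have h' : (base_chars.length : Int) = 256 := by simpa using h
    have hg : get_chars_per_byte base_chars = some 1 := by simp [get_chars_per_byte, h']
    simp only [encode_base, encode_base_alt, hg]
    exact pv_case base_chars 1 256 1 (by decide) h (by norm_num) bytes hB
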